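-- pv_equiv track=rewrite | github.com/HMacielF/RemnantSystem | scrapers/slab_scraper/unified_csv.py | canonical_finishes
-- ===== SOURCE A (Python) =====
-- from typing import Iterable
--
-- CANONICAL_FINISHES = {
--     "polished": "Polished",
--     "honed": "Honed",
--     "leathered": "Leathered",
--     "leather": "Leathered",
--     "brushed": "Brushed",
--     "matte": "Matte",
--     "natural": "Natural",
--     "sandblasted": "Sandblasted",
--     "sandblast": "Sandblasted",
--     "flamed": "Flamed",
--     "hammered": "Hammered",
--     "textured": "Textured",
--     "satin": "Satin",
--     "silk": "Silk",
--     "suede": "Suede",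
--     "glossy": "Glossy",
--     "velvet": "Velvet",
--     "concrete": "Concrete",
--     "dual": "Dual",
--     "rough": "Rough",
-- }
--
-- def join_list(values: Iterable[str] | None, dedupe: bool = True) -> str | None:
--     if not values:
--         return None
--     cleaned = []
--     seen = set()
--     for value in values:
--         text = str(value or "").strip().replace(";", ",")
--         if not text:
--             continue
--         if dedupe:
--             key = text.lower()
--             if key in seen:
--                 continue
--             seen.add(key)
--         cleaned.append(text)
--     return ";".join(cleaned) if cleaned else None
--
-- def canonical_finishes(values: Iterable[str] | None) -> str | None:
--     if not values:
--         return None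
--     out = []
--     for raw in values:
--         key = str(raw or "").strip().lower()
--         if not key:
--             continue
--         out.append(CANONICAL_FINISHES.get(key, raw.strip()))
--     return join_list(out)
-- ===== SOURCE B (Python) =====
-- from typing import Iterable
--
-- CANONICAL_FINISHES = {
--     "polished": "Polished",
--     "honed": "Honed",
--     "leathered": "Leathered",
--     "leather": "Leathered",
--     "brushed": "Brushed",
--     "matte": "Matte",
--     "natural": "Natural",
--     "sandblasted": "Sandblasted",
--     "sandblast": "Sandblasted",
--     "flamed": "Flamed",
--     "hammered": "Hammered",
--     "textured": "Textured",
--     "satin": "Satin",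
--     "silk": "Silk",
--     "suede": "Suede",
--     "glossy": "Glossy",
--     "velvet": "Velvet",
--     "concrete": "Concrete",
--     "dual": "Dual",
--     "rough": "Rough",
-- }
--
-- def canonical_finishes(values: Iterable[str] | None) -> str | None:
--     if not values:
--         return None
--     # one fused pass: an insertion-ordered dict does the dedup (key = lowercased text)
--     uniq = {}
--     for raw in values:
--         key = str(raw or "").strip().lower()
--         if not key:
--             continue
--         canonical = CANONICAL_FINISHES.get(key, raw.strip())
--         text = str(canonical or "").strip().replace(";", ",")
--         if not text:
--             continue
--         uniq.setdefault(text.lower(), text)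
--     return ";".join(uniq.values()) if uniq else None
-- ===== Notes on version B (the rewrite author's own statement) =====
-- stated objective: simpler
-- what changed: A builds an intermediate canonical list and then delegates to a separate join_list helper that dedupes with a list+set pair; B is one fused pass with no intermediate list, deduping via a single insertion-ordered dict (setdefault keyed by the lowercased text) whose values are joined at the end.
import Mathlib
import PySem

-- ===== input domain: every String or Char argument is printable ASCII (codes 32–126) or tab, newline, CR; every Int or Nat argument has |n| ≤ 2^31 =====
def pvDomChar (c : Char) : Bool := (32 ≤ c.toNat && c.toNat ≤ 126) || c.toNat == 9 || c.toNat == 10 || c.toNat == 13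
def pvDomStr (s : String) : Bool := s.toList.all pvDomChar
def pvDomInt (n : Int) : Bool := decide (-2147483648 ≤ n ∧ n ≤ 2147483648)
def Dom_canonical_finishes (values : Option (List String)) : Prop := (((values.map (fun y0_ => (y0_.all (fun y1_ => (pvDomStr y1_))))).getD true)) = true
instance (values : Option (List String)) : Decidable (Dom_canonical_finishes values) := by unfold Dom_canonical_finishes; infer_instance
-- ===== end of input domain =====

-- B fuses A's two passes (build canonical list, then join_list's list+set dedupe) into one
-- loop over values deduping through a single insertion-ordered dict; return values agree everywhere.

-- ===== PORT A =====
def CANONICAL_FINISHES : PySem.Dict String String := PySem.Dict.ofList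
  [("polished", "Polished"), ("honed", "Honed"), ("leathered", "Leathered"),
   ("leather", "Leathered"), ("brushed", "Brushed"), ("matte", "Matte"),
   ("natural", "Natural"), ("sandblasted", "Sandblasted"), ("sandblast", "Sandblasted"),
   ("flamed", "Flamed"), ("hammered", "Hammered"), ("textured", "Textured"),
   ("satin", "Satin"), ("silk", "Silk"), ("suede", "Suede"), ("glossy", "Glossy"),
   ("velvet", "Velvet"), ("concrete", "Concrete"), ("dual", "Dual"), ("rough", "Rough")]

def join_list (values : Option (List String)) (dedupe : Bool) : Option String :=
  match values with
  | none => none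
  | some vs =>
    if vs = [] then none
    else
      let st := vs.foldl (fun (st : List String × PySem.Set String) value =>
        let text := PySem.Str.replace (PySem.Str.strip (if value = "" then "" else value)) ";" ","
        if text = "" then st
        else if dedupe then
          let key := PySem.Str.lower text
          if PySem.Set.contains st.2 key then st
          else (st.1 ++ [text], PySem.Set.add st.2 key)
        else (st.1 ++ [text], st.2)) ([], PySem.Set.empty)
      if st.1 = [] then none else some (PySem.Str.join ";" st.1)

def canonical_finishes (values : Option (List String)) : Option String :=
  match values with
  | none => none
  | some vs =>
    if vs = [] then none
    else
      let out := vs.foldl (fun out raw =>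
        let key := PySem.Str.lower (PySem.Str.strip (if raw = "" then "" else raw))
        if key = "" then out
        else out ++ [CANONICAL_FINISHES.getD key (PySem.Str.strip raw)]) []
      join_list (some out) true

-- ===== PORT B =====
def canonical_finishes_alt (values : Option (List String)) : Option String :=
  match values with
  | none => none
  | some vs =>
    if vs = [] then none
    else
      let uniq := vs.foldl (fun (uniq : PySem.Dict String String) raw =>
        let key := PySem.Str.lower (PySem.Str.strip (if raw = "" then "" else raw))
        if key = "" then uniq
        else
          let canonical := CANONICAL_FINISHES.getD key (PySem.Str.strip raw)
          let text := PySem.Str.replace (PySem.Str.strip (if canonical = "" then "" else canonical)) ";" ","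
          if text = "" then uniq
          else uniq.setdefault (PySem.Str.lower text) text) PySem.Dict.empty
      if uniq.size = 0 then none else some (PySem.Str.join ";" uniq.values)

-- ===== PRECONDITION & SPEC =====
def Spec_canonical_finishes (values : Option (List String)) (out : Option String) : Prop := out = canonical_finishes_alt values
instance (values : Option (List String)) (out : Option String) : Decidable (Spec_canonical_finishes values out) := by unfold Spec_canonical_finishes; infer_instance

-- ===== CLAIM (what is proved, stated in full; the proofs are below) =====
def Claim_equal_canonical_finishes : Prop := ∀ (values : Option (List String)), Dom_canonical_finishes values → Spec_canonical_finishes values (canonical_finishes values)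

-- ===== LEMMAS AND PROOFS =====

def pvKey (raw : String) : String :=
  PySem.Str.lower (PySem.Str.strip (if raw = "" then "" else raw))

def pvCanon (raw : String) : String :=
  CANONICAL_FINISHES.getD (pvKey raw) (PySem.Str.strip raw)

def pvText (v : String) : String :=
  PySem.Str.replace (PySem.Str.strip (if v = "" then "" else v)) ";" ","

-- the per-element contribution A appends to `out`
def pvEmit (raw : String) : List String :=
  if pvKey raw = "" then [] else [pvCanon raw]

-- join_list's dedupe step (dedupe = true)
def pvStepA (st : List String × PySem.Set String) (value : String) : List String × PySem.Set String :=
  if pvText value = "" then st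
  else if PySem.Set.contains st.2 (PySem.Str.lower (pvText value)) then st
  else (st.1 ++ [pvText value], PySem.Set.add st.2 (PySem.Str.lower (pvText value)))

-- B's step
def pvStepB (uniq : PySem.Dict String String) (raw : String) : PySem.Dict String String :=
  if pvKey raw = "" then uniq
  else if pvText (pvCanon raw) = "" then uniq
  else uniq.setdefault (PySem.Str.lower (pvText (pvCanon raw))) (pvText (pvCanon raw))

lemma pvStepB_nodup (uniq : PySem.Dict String String) (raw : String)
    (h : uniq.keys.Nodup) : (pvStepB uniq raw).keys.Nodup := by
  unfold pvStepB
  split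
  · exact h
  · split
    · exact h
    · by_cases hc : uniq.contains (PySem.Str.lower (pvText (pvCanon raw))) = true
      · rw [PySem.Dict.setdefault_of_contains _ _ hc]; exact h
      · rw [PySem.Dict.setdefault_of_not_contains _ _ (by simp [hc])]
        exact PySem.Dict.nodup_keys_insert _ _ _ h

lemma pvStep_one (uniq : PySem.Dict String String) (raw : String) :
    (pvEmit raw).foldl pvStepA (uniq.values, uniq.keys)
      = ((pvStepB uniq raw).values, (pvStepB uniq raw).keys) := by
  unfold pvEmit pvStepB
  by_cases hk : pvKey raw = ""
  · simp [hk]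
  · rw [if_neg hk, if_neg hk, List.foldl_cons, List.foldl_nil]
    unfold pvStepA
    by_cases ht : pvText (pvCanon raw) = ""
    · simp [ht]
    · rw [if_neg ht, if_neg ht]
      by_cases hc : uniq.contains (PySem.Str.lower (pvText (pvCanon raw))) = true
      · rw [PySem.Dict.setdefault_of_contains _ _ hc, if_pos]
        rw [PySem.Set.contains_iff]
        exact (PySem.Dict.contains_iff_mem_keys _ _).mp hc
      · have hmem : PySem.Str.lower (pvText (pvCanon raw)) ∉ uniq.keys := fun hm =>
          absurd ((PySem.Dict.contains_iff_mem_keys _ _).mpr hm) (by simp [hc])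
        rw [PySem.Dict.setdefault_of_not_contains _ _ (by simp [hc]), if_neg]
        · rw [PySem.Set.add_of_not_mem hmem]
          have hitems := PySem.Dict.items_insert_of_not_contains
            (d := uniq) (k := PySem.Str.lower (pvText (pvCanon raw)))
            (v := pvText (pvCanon raw)) (by simp [hc])
          simp [PySem.Dict.values, PySem.Dict.keys, hitems]
        · rw [PySem.Set.contains_iff]; exact hmem

lemma pvFuse (vs : List String) (uniq : PySem.Dict String String)
    (h : uniq.keys.Nodup) :
    (vs.flatMap pvEmit).foldl pvStepA (uniq.values, uniq.keys)
      = ((vs.foldl pvStepB uniq).values, (vs.foldl pvStepB uniq).keys) := by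
  induction vs generalizing uniq with
  | nil => simp
  | cons r t ih =>
    simp only [List.flatMap_cons, List.foldl_append, List.foldl_cons]
    rw [pvStep_one uniq r]
    exact ih _ (pvStepB_nodup _ _ h)

lemma pvOut_eq (vs : List String) :
    vs.foldl (fun out raw =>
      let key := PySem.Str.lower (PySem.Str.strip (if raw = "" then "" else raw))
      if key = "" then out
      else out ++ [CANONICAL_FINISHES.getD key (PySem.Str.strip raw)]) []
    = vs.flatMap pvEmit := by
  have h1 : vs.foldl (fun out raw =>
      let key := PySem.Str.lower (PySem.Str.strip (if raw = "" then "" else raw))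
      if key = "" then out
      else out ++ [CANONICAL_FINISHES.getD key (PySem.Str.strip raw)]) []
      = vs.foldl (fun acc x => acc ++ pvEmit x) [] := by
    apply PySem.List.foldl_congr_mem
    intro acc x _
    by_cases h : PySem.Str.lower (PySem.Str.strip (if x = "" then "" else x)) = "" <;>
      simp [pvEmit, pvKey, pvCanon, h]
  rw [h1, PySem.List.foldl_append_eq_flatMap]
  simp

-- join_list with dedupe = true, phrased through pvStepA (definitional)
lemma pvJoin_true (out : List String) :
    join_list (some out) true
      = (if out = [] then none
         else
           let st := out.foldl pvStepA ([], PySem.Set.empty)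
           if st.1 = [] then none else some (PySem.Str.join ";" st.1)) := rfl

-- B's port phrased through pvStepB (definitional)
lemma pvAlt_eq (vs : List String) :
    canonical_finishes_alt (some vs)
      = (if vs = [] then none
         else
           let d := vs.foldl pvStepB PySem.Dict.empty
           if d.size = 0 then none else some (PySem.Str.join ";" d.values)) := rfl

-- ===== VERDICT (by name: the statement is the Claim_ definition above) =====
theorem canonical_finishes_spec : Claim_equal_canonical_finishes := by
  intro values _
  unfold Spec_canonical_finishes
  match values with
  | none => rfl
  | some vs =>
    rw [pvAlt_eq]
    unfold canonical_finishes
    simp only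
    by_cases hvs : vs = []
    · simp [hvs]
    · rw [if_neg hvs, if_neg hvs, pvOut_eq, pvJoin_true]
      set d := vs.foldl pvStepB PySem.Dict.empty with hd
      have hfold : (vs.flatMap pvEmit).foldl pvStepA ([], PySem.Set.empty)
          = (d.values, d.keys) := by
        have := pvFuse vs PySem.Dict.empty (by simp [PySem.Dict.keys, PySem.Dict.empty])
        simpa [PySem.Dict.values, PySem.Dict.keys, PySem.Dict.empty, PySem.Set.empty, ← hd]
          using this
      by_cases hout : vs.flatMap pvEmit = []
      · rw [if_pos hout]
        rw [hout] at hfold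
        simp only [List.foldl_nil] at hfold
        have hv : d.values = [] := by
          have := congrArg Prod.fst hfold
          exact this.symm
        rw [if_pos]
        simp only [PySem.Dict.size, PySem.Dict.values] at hv ⊢
        simpa using congrArg List.length hv
      · rw [if_neg hout]
        simp only [hfold]
        by_cases hv : d.values = []
        · rw [if_pos hv, if_pos]
          simp only [PySem.Dict.size, PySem.Dict.values] at hv ⊢
          simpa using congrArg List.length hv
        · rw [if_neg hv, if_neg]
          simp only [PySem.Dict.size, PySem.Dict.values] at hv ⊢
          intro hlen
          exact hv (List.eq_nil_of_length_eq_zero (by simpa using hlen))
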